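-- pv_equiv track=rewrite | github.com/rafcc/pytorch-bsf | torch_bsf/control_points.py | simplex_indices
-- ===== SOURCE A (Python) =====
-- from typing import Iterable, Iterator, Sequence, TypeAlias, cast
--
-- def simplex_indices(n_params: int, degree: int) -> Iterable[tuple[int, ...]]:
--     r"""Iterates the index of control points of a Bezier simplex.
--
--     Parameters
--     ----------
--     n_params
--         The tuple length of each index.
--     degree
--         The degree of the Bezier simplex.
--
--     Returns
--     -------
--     The indices.
--     """
--     if n_params < 0:
--         raise ValueError(f"n_params must be non-negative, but {n_params} is given.")
--     if degree < 0:
--         raise ValueError(f"degree must be non-negative, but {degree} is given.")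
--     if n_params == 0:
--         yield cast(tuple[int, ...], ())
--         return
--
--     def iterate(c: tuple[int, ...], r: int) -> Iterable[tuple[int, ...]]:
--         if len(c) == n_params - 1:
--             yield c + (r,)
--         else:
--             for i in range(r, -1, -1):
--                 yield from iterate(c + (i,), r - i)
--
--     yield from iterate((), degree)
-- ===== SOURCE B (Python) =====
-- import itertools
--
-- def simplex_indices(n_params, degree):
--     if n_params < 0:
--         raise ValueError(f"n_params must be non-negative, but {n_params} is given.")
--     if degree < 0:
--         raise ValueError(f"degree must be non-negative, but {degree} is given.")
--     if n_params == 0: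
--         yield ()
--         return
--     for combo in itertools.combinations_with_replacement(range(n_params), degree):
--         yield tuple(combo.count(j) for j in range(n_params))
-- ===== Notes on version B (the rewrite author's own statement) =====
-- stated objective: idiomatic
-- what changed: Replaces the hand-written recursive backtracking helper `iterate` by a single loop over itertools.combinations_with_replacement(range(n_params), degree), mapping each combination to its per-symbol count vector; the CWR lexicographic order coincides with A's descending-lexicographic composition order.
import Mathlib
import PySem

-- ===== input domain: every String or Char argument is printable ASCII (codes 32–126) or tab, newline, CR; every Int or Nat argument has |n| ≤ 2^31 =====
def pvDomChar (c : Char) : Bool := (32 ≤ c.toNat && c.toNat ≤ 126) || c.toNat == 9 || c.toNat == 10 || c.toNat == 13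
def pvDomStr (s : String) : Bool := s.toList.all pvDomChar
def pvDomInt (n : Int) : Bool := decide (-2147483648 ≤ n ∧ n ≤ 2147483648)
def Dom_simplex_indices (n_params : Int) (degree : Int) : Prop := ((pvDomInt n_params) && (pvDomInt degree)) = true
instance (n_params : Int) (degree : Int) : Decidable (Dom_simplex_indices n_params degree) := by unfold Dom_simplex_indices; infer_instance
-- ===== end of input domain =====

-- B replaces A's recursive `iterate` helper by enumerating combinations_with_replacement
-- and mapping each combination to its per-symbol count vector (objective: idiomatic).
-- Both Pythons are generators; equivalence is about the list of yielded tuples.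

-- ===== PORT A =====
-- A's inner `iterate(c, r)`: recursion adds one coordinate per call; `fuel` counts the
-- remaining open slots (n_params - 1 - len c) and only makes the recursion total — on
-- every input admitted by Pre_ the 0-fuel branch is unreachable.
def iterA (n : Int) (fuel : Nat) (c : List Int) (r : Int) : List (List Int) :=
  if (c.length : Int) = n - 1 then [c ++ [r]]
  else match fuel with
    | 0 => []
    | f + 1 => (PySem.List.pyRange r (-1) (-1)).flatMap (fun i => iterA n f (c ++ [i]) (r - i))

def simplex_indices (n_params : Int) (degree : Int) : List (List Int) :=
  if n_params < 0 then []            -- raise ValueError: excluded by Pre_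
  else if degree < 0 then []         -- raise ValueError: excluded by Pre_
  else if n_params = 0 then [[]]
  else iterA n_params (n_params - 1).toNat [] degree

-- ===== PORT B =====
-- itertools.combinations_with_replacement(pool, k) in its lexicographic order:
-- tuples starting with the first pool element first, then those without it.
def cwr (pool : List Int) (k : Nat) : List (List Int) :=
  match k, pool with
  | 0, _ => [[]]
  | _ + 1, [] => []
  | k + 1, x :: rest => (cwr (x :: rest) k).map (fun t => x :: t) ++ cwr rest (k + 1)
termination_by (k, pool.length)

def simplex_indices_alt (n_params : Int) (degree : Int) : List (List Int) :=
  if n_params < 0 then []            -- raise ValueError: excluded by Pre_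
  else if degree < 0 then []         -- raise ValueError: excluded by Pre_
  else if n_params = 0 then [[]]
  else (cwr (PySem.List.pyRange 0 n_params 1) degree.toNat).map
    (fun combo => (PySem.List.pyRange 0 n_params 1).map (fun j => (PySem.List.count combo j : Int)))

-- ===== PRECONDITION & SPEC =====
-- A raises ValueError exactly when n_params < 0 or degree < 0; nothing else is excluded.
def Pre_simplex_indices (n_params : Int) (degree : Int) : Prop := 0 ≤ n_params ∧ 0 ≤ degree
instance (n_params : Int) (degree : Int) : Decidable (Pre_simplex_indices n_params degree) := by unfold Pre_simplex_indices; infer_instance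
def pvWitness_simplex_indices : Int × Int := (3, 2)

def Spec_simplex_indices (n_params : Int) (degree : Int) (out : List (List Int)) : Prop := out = simplex_indices_alt n_params degree
instance (n_params : Int) (degree : Int) (out : List (List Int)) : Decidable (Spec_simplex_indices n_params degree out) := by unfold Spec_simplex_indices; infer_instance

-- ===== CLAIM (what is proved, stated in full; the proofs are below) =====
def Claim_equal_simplex_indices : Prop := ∀ (n_params : Int) (degree : Int), Dom_simplex_indices n_params degree → Pre_simplex_indices n_params degree → Spec_simplex_indices n_params degree (simplex_indices n_params degree)

-- ===== LEMMAS AND PROOFS =====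

-- [k, k-1, …, 0] : the common descending spine of both enumerations
def dd : Nat → List Nat
  | 0 => [0]
  | k + 1 => (k + 1) :: dd k

-- compositions of r into (f+1) parts, first coordinate descending (the shared normal form)
def compsN : Nat → Nat → List (List Int)
  | 0, r => [[(r : Int)]]
  | f + 1, r => (dd r).flatMap (fun j => (compsN f (r - j)).map (fun u => (j : Int) :: u))

lemma mem_dd {j k : Nat} (h : j ∈ dd k) : j ≤ k := by
  induction k with
  | zero => simp [dd] at h; omega
  | succ k ih =>
    simp [dd] at h
    rcases h with h | h
    · omega
    · exact Nat.le_succ_of_le (ih h)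

lemma pyRange_dd (k : Nat) : PySem.List.pyRange (k : Int) (-1) (-1) = List.map (fun j : Nat => (j : Int)) (dd k) := by
  induction k with
  | zero =>
    rw [PySem.List.pyRange_neg_one_cons (by norm_num)]
    rw [PySem.List.pyRange_neg_one_eq_nil (by norm_num)]
    simp [dd]
  | succ k ih =>
    rw [PySem.List.pyRange_neg_one_cons (by push_cast; omega)]
    push_cast
    rw [show (k : Int) + 1 - 1 = (k : Int) from by ring, ih]
    simp [dd]

lemma iterA_comps (fuel : Nat) : ∀ (n : Int) (c : List Int) (k : Nat),
    (c.length : Int) = n - 1 - fuel →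
    iterA n fuel c (k : Int) = (compsN fuel k).map (fun u => c ++ u) := by
  induction fuel with
  | zero =>
    intro n c k h
    rw [iterA, if_pos (by omega)]
    simp [compsN]
  | succ f ih =>
    intro n c k h
    rw [iterA, if_neg (by omega), pyRange_dd]
    have hfm : ∀ (g : Int → List (List Int)),
        (List.map (fun j : Nat => (j : Int)) (dd k)).flatMap g = (dd k).flatMap (fun j : Nat => g (j : Int)) :=
      fun g => List.flatMap_map _ _ _
    rw [hfm]
    simp only [compsN, List.map_flatMap, List.map_map]
    refine List.flatMap_congr (fun j hj => ?_)
    have hjk : j ≤ k := mem_dd hj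
    have hcast : (k : Int) - (j : Int) = ((k - j : Nat) : Int) := by
      push_cast [Nat.cast_sub hjk]; ring
    rw [hcast, ih n (c ++ [(j : Int)]) (k - j) (by simp; omega)]
    refine List.map_congr_left (fun u _ => ?_)
    simp

lemma cwr_single (a : Int) (k : Nat) : cwr [a] k = [List.replicate k a] := by
  induction k with
  | zero => simp [cwr]
  | succ k ih => simp [cwr, ih, List.replicate_succ]

lemma dd_shift (k : Nat) : dd (k + 1) = (dd k).map (· + 1) ++ [0] := by
  induction k with
  | zero => rfl
  | succ k ih =>
    show (k + 2) :: dd (k + 1) = ((k + 1) :: dd k).map (· + 1) ++ [0]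
    rw [List.map_cons, List.cons_append, ← ih]

lemma cwr_cons_eq (k : Nat) : ∀ (x : Int) (rest : List Int),
    cwr (x :: rest) k = (dd k).flatMap (fun i => (cwr rest (k - i)).map (fun t => List.replicate i x ++ t)) := by
  induction k with
  | zero => intro x rest; simp [cwr, dd]
  | succ k ih =>
    intro x rest
    conv_lhs => rw [cwr]
    rw [ih x rest, dd_shift]
    simp [List.map_flatMap, List.flatMap_map, List.map_map, List.replicate_succ, Function.comp_def]

lemma mem_cwr_mem : ∀ (k : Nat) (pool : List Int) (t : List Int), t ∈ cwr pool k → ∀ x ∈ t, x ∈ pool := by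
  intro k pool
  induction pool, k using cwr.induct with
  | case1 =>
    intro t ht x hx
    simp only [cwr, List.mem_singleton] at ht
    subst ht; simp at hx
  | case2 =>
    intro t ht
    simp [cwr] at ht
  | case3 k x rest ih1 ih2 =>
    intro t ht y hy
    rw [show cwr (x :: rest) k.succ = (cwr (x :: rest) k).map (fun t => x :: t) ++ cwr rest (k + 1) by rw [cwr]] at ht
    rcases List.mem_append.mp ht with ht | ht
    · rcases List.mem_map.mp ht with ⟨u, hu, rfl⟩
      rcases List.mem_cons.mp hy with rfl | hy
      · exact List.mem_cons_self
      · exact ih1 u hu y hy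
    · exact List.mem_cons_of_mem x (ih2 t ht y hy)

lemma comps_cwr (d : Nat) : ∀ (a n : Int) (k : Nat), n - a = (d : Int) + 1 →
    (cwr (PySem.List.pyRange a n 1) k).map
      (fun combo => (PySem.List.pyRange a n 1).map (fun j => (PySem.List.count combo j : Int)))
      = compsN d k := by
  induction d with
  | zero =>
    intro a n k h
    have hn : n = a + 1 := by omega
    subst hn
    rw [PySem.List.pyRange_one_singleton, cwr_single]
    simp [compsN, PySem.List.count_eq, List.count_replicate_self]
  | succ d ih =>
    intro a n k h
    have ha : a < n := by omega
    rw [PySem.List.pyRange_one_cons ha, cwr_cons_eq]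
    simp only [compsN, List.map_flatMap, List.map_map]
    refine List.flatMap_congr (fun i hi => ?_)
    rw [← ih (a + 1) n (k - i) (by omega), List.map_map]
    refine List.map_congr_left (fun t ht => ?_)
    have hmem : ∀ x ∈ t, a + 1 ≤ x := by
      intro x hx
      have := mem_cwr_mem (k - i) _ t ht x hx
      exact (PySem.List.mem_pyRange_one.mp this).1
    have hnotin : (a : Int) ∉ t := fun hc => by have := hmem a hc; omega
    simp only [Function.comp_def, List.map_cons, PySem.List.count_eq, List.count_append,
      List.count_replicate, List.count_eq_zero.mpr hnotin, BEq.rfl, if_pos]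
    have hhead : ((i + 0 : Nat) : Int) = (i : Int) := by simp
    rw [hhead]
    refine congrArg (List.cons _) (List.map_congr_left (fun j hj => ?_))
    have hja : a + 1 ≤ j := (PySem.List.mem_pyRange_one.mp hj).1
    have hne : ((a : Int) == j) = false := by simp; omega
    rw [hne]
    simp

-- ===== VERDICT (by name: the statement is the Claim_ definition above) =====
theorem simplex_indices_spec : Claim_equal_simplex_indices := by
  intro n d _ hpre
  obtain ⟨hn, hd⟩ := hpre
  unfold Spec_simplex_indices simplex_indices simplex_indices_alt
  by_cases h0 : n = 0
  · subst h0
    simp [show ¬(d < 0) from by omega]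
  · rw [if_neg (by omega), if_neg (by omega), if_neg h0,
        if_neg (by omega), if_neg (by omega), if_neg h0]
    have h1 : 1 ≤ n := by omega
    have hk : ((d.toNat : Int)) = d := Int.toNat_of_nonneg hd
    have hfuel : (((n - 1).toNat : Int)) = n - 1 := Int.toNat_of_nonneg (by omega)
    rw [← hk, iterA_comps (n - 1).toNat n [] d.toNat (by simp; omega), Int.toNat_natCast]
    rw [comps_cwr (n - 1).toNat 0 n d.toNat (by omega)]
    simp
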